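-- pv_equiv track=rewrite | github.com/ELIFE-ASU/Neet | neet/sensitivity.py | _states_limited
-- ===== SOURCE A (Python) =====
-- import copy
--
-- def _states_limited(nodes, state):
--     """
--     All possible states that vary only nodes with given indices.
--     """
--     if len(nodes) == 0:
--         return [state]
--     for i in nodes:
--         stateFlipped = copy.copy(state)
--         stateFlipped[nodes[0]] = (stateFlipped[nodes[0]] + 1) % 2
--
--         left_rec = _states_limited(nodes[1:], state)
--         right_rec = _states_limited(nodes[1:], stateFlipped)
--         return left_rec + right_rec
-- ===== SOURCE B (Python) =====
-- def _states_limited(nodes, state):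
--     result = [state]
--     for n in nodes:
--         nxt = []
--         for s in result:
--             nxt.append(s)
--             t = list(s)
--             t[n] = (t[n] + 1) % 2
--             nxt.append(t)
--         result = nxt
--     return result
-- ===== Notes on version B (the rewrite author's own statement) =====
-- stated objective: simpler
-- what changed: Replaces the recursion (with its repeated nodes[1:] slicing) by a single iterative pass that doubles an accumulator list per node, appending each state unflipped then flipped.
import Mathlib
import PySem

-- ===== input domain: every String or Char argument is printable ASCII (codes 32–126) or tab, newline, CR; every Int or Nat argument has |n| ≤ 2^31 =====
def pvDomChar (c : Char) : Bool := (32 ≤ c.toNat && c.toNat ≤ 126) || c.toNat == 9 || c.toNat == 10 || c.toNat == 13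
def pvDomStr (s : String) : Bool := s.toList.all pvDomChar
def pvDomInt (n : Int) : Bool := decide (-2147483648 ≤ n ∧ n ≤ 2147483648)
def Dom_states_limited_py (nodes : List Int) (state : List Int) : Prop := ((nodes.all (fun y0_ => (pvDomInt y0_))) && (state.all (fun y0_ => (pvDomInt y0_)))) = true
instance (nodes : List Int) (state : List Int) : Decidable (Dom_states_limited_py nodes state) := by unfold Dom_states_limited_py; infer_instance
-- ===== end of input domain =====

-- B is an iterative accumulation (doubling pass per node) instead of A's recursion over nodes; same output order.

-- shared helper: a copy of s with s[n] flipped via (x+1)%2 — both Pythons contain this identical two-line flip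
-- (pyGetD/pySetD are the total forms of Python indexing; exact under Pre_ InRange)
def pvFlip (s : List Int) (n : Int) : List Int :=
  PySem.List.pySetD s n (PySem.Int.mod (PySem.List.pyGetD s n 0 + 1) 2)

-- ===== PORT A =====

def states_limited_py (nodes : List Int) (state : List Int) : List (List Int) :=
  match nodes with
  | [] => [state]
  | n :: rest =>
    -- the 'for i in nodes' loop returns on its first iteration, with n = nodes[0]
    states_limited_py rest state ++ states_limited_py rest (pvFlip state n)

-- ===== PORT B =====
def states_limited_py_alt (nodes : List Int) (state : List Int) : List (List Int) :=
  nodes.foldl (fun result n =>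
    result.foldl (fun nxt s => nxt ++ [s, pvFlip s n]) []) [state]

-- ===== PRECONDITION & SPEC =====
-- exactly the inputs where every index in nodes is a valid (possibly negative) index of state; elsewhere Python A raises IndexError
def Pre_states_limited_py (nodes : List Int) (state : List Int) : Prop :=
  ∀ n ∈ nodes, PySem.Raise.InRange state.length n
instance (nodes : List Int) (state : List Int) : Decidable (Pre_states_limited_py nodes state) := by unfold Pre_states_limited_py; infer_instance
def pvWitness_states_limited_py : List Int × List Int := ([1, 0], [0, 1, 1])

def Spec_states_limited_py (nodes : List Int) (state : List Int) (out : List (List Int)) : Prop := out = states_limited_py_alt nodes state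
instance (nodes : List Int) (state : List Int) (out : List (List Int)) : Decidable (Spec_states_limited_py nodes state out) := by unfold Spec_states_limited_py; infer_instance

-- ===== CLAIM (what is proved, stated in full; the proofs are below) =====
def Claim_equal_states_limited_py : Prop := ∀ (nodes : List Int) (state : List Int), Dom_states_limited_py nodes state → Pre_states_limited_py nodes state → Spec_states_limited_py nodes state (states_limited_py nodes state)

-- ===== LEMMAS AND PROOFS =====

lemma inner_foldl (res : List (List Int)) (n : Int) (acc : List (List Int)) :
    res.foldl (fun nxt s => nxt ++ [s, pvFlip s n]) acc
      = acc ++ res.flatMap (fun s => [s, pvFlip s n]) := by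
  induction res generalizing acc with
  | nil => simp
  | cons s rest ih => simp [List.foldl, ih, List.append_assoc]

lemma outer_foldl (nodes : List Int) (res : List (List Int)) :
    nodes.foldl (fun result n => result.foldl (fun nxt s => nxt ++ [s, pvFlip s n]) []) res
      = res.flatMap (fun s => states_limited_py nodes s) := by
  induction nodes generalizing res with
  | nil => simp [states_limited_py]
  | cons n rest ih =>
    rw [List.foldl_cons, inner_foldl, List.nil_append, ih, List.flatMap_assoc]
    simp [states_limited_py]

-- ===== VERDICT (by name: the statement is the Claim_ definition above) =====
theorem states_limited_py_spec : Claim_equal_states_limited_py := by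
  intro nodes state _ _
  unfold Spec_states_limited_py states_limited_py_alt
  rw [outer_foldl]
  simp
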